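-- pv_equiv track=rewrite | github.com/yoshikikasama/backend | other/codility/maxProfit.py | solution
-- ===== SOURCE A (Python) =====
-- def solution(A):
--     n = len(A)
--     A.reverse()
--     max = 0
--     profit = 0
--     tmp_profit = 0
--     for k in range(n):
--         max = A[k]
--         for j in range(k, n-k):
--             tmp_profit = max - A[j]
--             if tmp_profit > profit:
--                 profit = tmp_profit
--     return profit
-- ===== SOURCE B (Python) =====
-- def solution(A):
--     A.reverse()
--     n = len(A)
--     profit = 0
--     mn = None
--     for k in range((n - 1) // 2, -1, -1):
--         cur = A[k] if mn is None else min(mn, A[k])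
--         mn = min(cur, A[n - 1 - k])
--         p = A[k] - mn
--         if p > profit:
--             profit = p
--     return profit
-- ===== Notes on version B (the rewrite author's own statement) =====
-- stated objective: faster
-- what changed: Replaces A's O(n^2) nested rescan of the shrinking interval [k, n-k) for every k with a single O(n) pass that walks k from the middle outward and maintains the interval minimum incrementally (each step adds only the two new endpoints).
import Mathlib
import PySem

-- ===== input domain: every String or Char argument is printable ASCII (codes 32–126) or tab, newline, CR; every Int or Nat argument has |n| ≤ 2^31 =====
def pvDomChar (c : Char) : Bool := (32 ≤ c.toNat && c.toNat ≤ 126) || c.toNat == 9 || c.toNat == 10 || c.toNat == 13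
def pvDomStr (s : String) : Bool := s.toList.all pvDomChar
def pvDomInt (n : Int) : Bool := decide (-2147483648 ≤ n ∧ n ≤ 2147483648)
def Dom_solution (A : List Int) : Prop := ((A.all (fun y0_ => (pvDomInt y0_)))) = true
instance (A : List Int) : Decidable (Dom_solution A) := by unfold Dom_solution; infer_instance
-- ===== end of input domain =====

-- B replaces A's O(n^2) nested rescans by one pass from the middle outward that maintains the
-- interval minimum incrementally (objective: faster). Both A and B reverse the input list in
-- place exactly as the Python does; the equivalence proved here is about the return value.

-- ===== PORT A =====
-- indices k (from range(n)) and j (from range(k, n-k)) are always in range, so pyGetD is exact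
def solution (A : List Int) : Int :=
  let n : Int := PySem.List.len A
  let R := A.reverse
  (PySem.List.pyRange 0 n 1).foldl (fun profit k =>
    let mx := PySem.List.pyGetD R k 0
    (PySem.List.pyRange k (n - k) 1).foldl (fun profit j =>
      let tmp := mx - PySem.List.pyGetD R j 0
      if tmp > profit then tmp else profit) profit) 0

-- ===== PORT B =====
-- indices k and n-1-k are always in range for k in range((n-1)//2, -1, -1), so pyGetD is exact
def solution_alt (A : List Int) : Int :=
  let R := A.reverse
  let n : Int := PySem.List.len R
  let st := (PySem.List.pyRange (PySem.Int.floordiv (n - 1) 2) (-1) (-1)).foldl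
    (fun (st : Option Int × Int) k =>
      let a := PySem.List.pyGetD R k 0
      let cur := match st.1 with
        | none => a
        | some m => min m a
      let mn := min cur (PySem.List.pyGetD R (n - 1 - k) 0)
      let p := a - mn
      (some mn, if p > st.2 then p else st.2))
    (none, (0 : Int))
  st.2

-- ===== PRECONDITION & SPEC =====
def Spec_solution (A : List Int) (out : Int) : Prop := out = solution_alt A
instance (A : List Int) (out : Int) : Decidable (Spec_solution A out) := by unfold Spec_solution; infer_instance

-- ===== CLAIM (what is proved, stated in full; the proofs are below) =====
def Claim_equal_solution : Prop := ∀ (A : List Int), Dom_solution A → Spec_solution A (solution A)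

-- ===== LEMMAS AND PROOFS =====

-- value at index i of the reversed list, as both ports read it
def gI (R : List Int) (i : Int) : Int := PySem.List.pyGetD R i 0

-- minimum of R over the index interval [k, N-k)
def mnvI (R : List Int) (N k : Int) : Int :=
  (PySem.List.pyRange (k + 1) (N - k) 1).foldl (fun m j => min m (gI R j)) (gI R k)

-- the best profit achievable with buy index k: R[k] - min over [k, N-k)
def MI (R : List Int) (N k : Int) : Int := gI R k - mnvI R N k

theorem foldl_if_max (F : Int → Int) :
    ∀ (L : List Int) (p : Int),
      L.foldl (fun p j => if F j > p then F j else p) p = L.foldl (fun p j => max p (F j)) p := by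
  intro L
  induction L with
  | nil => intro p; rfl
  | cons x L ih =>
      intro p
      simp only [List.foldl_cons, ih]
      congr 1
      omega

theorem foldl_max_sub_min (F : Int → Int) (c : Int) :
    ∀ (L : List Int) (p m0 : Int),
      L.foldl (fun p j => max p (c - F j)) (max p (c - m0)) =
        max p (c - L.foldl (fun m j => min m (F j)) m0) := by
  intro L
  induction L with
  | nil => intro p m0; rfl
  | cons x L ih =>
      intro p m0
      simp only [List.foldl_cons]
      have h : max (max p (c - m0)) (c - F x) = max p (c - min m0 (F x)) := by omega
      rw [h, ih]

theorem foldl_min_pull (F : Int → Int) :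
    ∀ (L : List Int) (a b : Int),
      L.foldl (fun m j => min m (F j)) (min a b) = min a (L.foldl (fun m j => min m (F j)) b) := by
  intro L
  induction L with
  | nil => intro a b; rfl
  | cons x L ih =>
      intro a b
      simp only [List.foldl_cons]
      have h : min (min a b) (F x) = min a (min b (F x)) := by omega
      rw [h, ih]

theorem foldl_max_pull (F : Int → Int) :
    ∀ (L : List Int) (a b : Int),
      L.foldl (fun q j => max q (F j)) (max a b) = max a (L.foldl (fun q j => max q (F j)) b) := by
  intro L
  induction L with
  | nil => intro a b; rfl
  | cons x L ih =>
      intro a b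
      simp only [List.foldl_cons]
      have h : max (max a b) (F x) = max a (max b (F x)) := by omega
      rw [h, ih]

theorem foldl_max_reverse (F : Int → Int) :
    ∀ (L : List Int) (p : Int),
      L.reverse.foldl (fun q j => max q (F j)) p = L.foldl (fun q j => max q (F j)) p := by
  intro L
  induction L with
  | nil => intro p; rfl
  | cons x L ih =>
      intro p
      simp only [List.reverse_cons, List.foldl_append, List.foldl_cons, List.foldl_nil, ih]
      have h : max p (F x) = max (F x) p := by omega
      rw [h, foldl_max_pull]
      omega

theorem foldl_id {α β : Type} (f : β → α → β) :
    ∀ (L : List α) (s : β), (∀ s x, x ∈ L → f s x = s) → L.foldl f s = s := by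
  intro L
  induction L with
  | nil => intro s _; rfl
  | cons x L ih =>
      intro s h
      simp only [List.foldl_cons]
      rw [h s x (by simp), ih _ (fun s' y hy => h s' y (by simp [hy]))]

-- interval-minimum recurrence: adding the two endpoints k and N-1-k to the interval of k+1
theorem mnv_rec (R : List Int) (N k : Int) (h : 2 * k + 3 ≤ N) :
    min (min (mnvI R N (k + 1)) (gI R k)) (gI R (N - 1 - k)) = mnvI R N k := by
  unfold mnvI
  rw [show N - (k + 1) = N - k - 1 from by ring, show N - 1 - k = N - k - 1 from by ring]
  have hR : (PySem.List.pyRange (k + 1) (N - k) 1).foldl (fun m j => min m (gI R j)) (gI R k) =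
      min ((PySem.List.pyRange (k + 1 + 1) (N - k - 1) 1).foldl (fun m j => min m (gI R j))
        (min (gI R k) (gI R (k + 1)))) (gI R (N - k - 1)) := by
    rw [show N - k = N - k - 1 + 1 from by ring,
      PySem.List.pyRange_one_succ_right (a := k + 1) (b := N - k - 1) (by omega),
      PySem.List.pyRange_one_cons (a := k + 1) (b := N - k - 1) (by omega)]
    simp only [List.foldl_append, List.foldl_cons, List.foldl_nil]
    ring_nf
  rw [hR, foldl_min_pull]
  omega

-- innermost interval: for the middle k the interval [k, N-k) is {k} or {k, k+1}
theorem mnv_base (R : List Int) (N K : Int) (h1 : 2 * K ≤ N - 1) (h2 : N - 1 ≤ 2 * K + 1) :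
    min (gI R K) (gI R (N - 1 - K)) = mnvI R N K := by
  unfold mnvI
  rcases (by omega : N = 2 * K + 1 ∨ N = 2 * K + 2) with hN | hN
  · subst hN
    rw [(by omega : 2 * K + 1 - K = K + 1), PySem.List.pyRange_one_eq_nil (by omega),
      List.foldl_nil]
    have : 2 * K + 1 - 1 - K = K := by ring
    rw [this]
    omega
  · subst hN
    rw [(by omega : 2 * K + 2 - K = (K + 1) + 1), PySem.List.pyRange_one_singleton,
      List.foldl_cons, List.foldl_nil]
    have : 2 * K + 2 - 1 - K = K + 1 := by ring
    rw [this]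

-- B's loop body as a named function (definitionally equal to the lambda in solution_alt)
def stepB (R : List Int) (N : Int) (st : Option Int × Int) (k : Int) : Option Int × Int :=
  let a := PySem.List.pyGetD R k 0
  let cur := match st.1 with
    | none => a
    | some m => min m a
  let mn := min cur (PySem.List.pyGetD R (N - 1 - k) 0)
  let p := a - mn
  (some mn, if p > st.2 then p else st.2)

theorem stepB_some (R : List Int) (N m p k : Int) :
    stepB R N (some m, p) k =
      (some (min (min m (PySem.List.pyGetD R k 0)) (PySem.List.pyGetD R (N - 1 - k) 0)),
        if PySem.List.pyGetD R k 0 -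
            min (min m (PySem.List.pyGetD R k 0)) (PySem.List.pyGetD R (N - 1 - k) 0) > p then
          PySem.List.pyGetD R k 0 -
            min (min m (PySem.List.pyGetD R k 0)) (PySem.List.pyGetD R (N - 1 - k) 0)
        else p) := rfl

theorem stepB_none (R : List Int) (N p k : Int) :
    stepB R N (none, p) k =
      (some (min (PySem.List.pyGetD R k 0) (PySem.List.pyGetD R (N - 1 - k) 0)),
        if PySem.List.pyGetD R k 0 -
            min (PySem.List.pyGetD R k 0) (PySem.List.pyGetD R (N - 1 - k) 0) > p then
          PySem.List.pyGetD R k 0 -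
            min (PySem.List.pyGetD R k 0) (PySem.List.pyGetD R (N - 1 - k) 0)
        else p) := rfl

-- loop invariant of B's single pass: walking k downward, the first state component is the
-- minimum of R over [k, N-k) and the second accumulates max p (MI _)
theorem b_inv (R : List Int) (N : Int) :
    ∀ (k : Nat) (p m : Int), 2 * (k : Int) + 1 ≤ N →
      min (min m (PySem.List.pyGetD R (k : Int) 0)) (PySem.List.pyGetD R (N - 1 - (k : Int)) 0) =
        mnvI R N (k : Int) →
      List.foldl (stepB R N) (some m, p) (PySem.List.pyRange (k : Int) (-1) (-1)) =
      (some (mnvI R N 0),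
        List.foldl (fun q j => max q (MI R N j)) p (PySem.List.pyRange (k : Int) (-1) (-1))) := by
  intro k
  induction k with
  | zero =>
      intro p m _ hm
      rw [PySem.List.pyRange_neg_one_cons (by norm_num),
        PySem.List.pyRange_neg_one_eq_nil (by norm_num)]
      simp only [Nat.cast_zero] at hm ⊢
      rw [List.foldl_cons, List.foldl_nil, List.foldl_cons, List.foldl_nil, stepB_some, hm]
      simp only [Prod.mk.injEq]
      refine ⟨trivial, ?_⟩
      have h0 : MI R N 0 = PySem.List.pyGetD R 0 0 - mnvI R N 0 := by simp [MI, gI]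
      rw [h0]
      omega
  | succ k ih =>
      intro p m hb hm
      have hc : ((k + 1 : Nat) : Int) = (k : Int) + 1 := by push_cast; ring
      rw [hc] at hm ⊢
      rw [PySem.List.pyRange_neg_one_cons (by omega),
        show (k : Int) + 1 - 1 = (k : Int) from by ring,
        List.foldl_cons, List.foldl_cons, stepB_some, hm]
      rw [show (if PySem.List.pyGetD R ((k : Int) + 1) 0 - mnvI R N ((k : Int) + 1) > p then
            PySem.List.pyGetD R ((k : Int) + 1) 0 - mnvI R N ((k : Int) + 1) else p) =
          max p (MI R N ((k : Int) + 1)) from by simp only [MI, gI]; omega]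
      exact ih (max p (MI R N ((k : Int) + 1))) (mnvI R N ((k : Int) + 1)) (by omega)
        (by simpa [gI] using mnv_rec R N (k : Int) (by omega))

-- ===== VERDICT (by name: the statement is the Claim_ definition above) =====
theorem solution_spec : Claim_equal_solution := by
  unfold Claim_equal_solution Spec_solution
  intro A _
  by_cases hA : A = []
  · subst hA; rfl
  set R := A.reverse with hRdef
  set N : Int := (A.length : Int) with hNdef
  have hN1 : 1 ≤ N := by
    have : A.length ≠ 0 := by simpa using hA
    omega
  set K : Int := PySem.Int.floordiv (N - 1) 2 with hKdef
  have hKb : 2 * K ≤ N - 1 ∧ N - 1 ≤ 2 * K + 1 := by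
    rw [hKdef, PySem.Int.floordiv_eq_ediv_of_pos (by norm_num)]
    omega
  -- ===== A reduces to a fold of max (MI _) over the ascending range [0, K] =====
  have hAside : solution A =
      (PySem.List.pyRange 0 (K + 1) 1).foldl (fun q j => max q (MI R N j)) 0 := by
    simp only [solution, PySem.List.len_eq, ← hNdef, ← hRdef]
    rw [PySem.List.pyRange_one_append 0 (K + 1) N (by omega) (by omega), List.foldl_append]
    rw [foldl_id _ (PySem.List.pyRange (K + 1) N 1) _ ?_]
    · apply PySem.List.foldl_congr_mem
      intro p x hx
      have hx' := PySem.List.mem_pyRange_one.mp hx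
      rw [PySem.List.pyRange_one_cons (a := x) (b := N - x) (by omega)]
      rw [foldl_if_max (fun j => PySem.List.pyGetD R x 0 - PySem.List.pyGetD R j 0)]
      simp only [List.foldl_cons]
      have := foldl_max_sub_min (fun j => PySem.List.pyGetD R j 0) (PySem.List.pyGetD R x 0)
        (PySem.List.pyRange (x + 1) (N - x) 1) p (PySem.List.pyGetD R x 0)
      rw [this]
      simp only [MI, mnvI, gI]
    · intro s x hx
      have hx' := PySem.List.mem_pyRange_one.mp hx
      rw [PySem.List.pyRange_one_eq_nil (by omega), List.foldl_nil]
  -- ===== B reduces to the same fold over the descending range, then reverse =====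
  have hBside : solution_alt A =
      ((PySem.List.pyRange K (-1) (-1)).foldl (fun q j => max q (MI R N j)) 0) := by
    have hlen : ((R.length : Nat) : Int) = N := by rw [hRdef, hNdef]; simp
    simp only [solution_alt, PySem.List.len_eq, ← hRdef]
    rw [hlen, ← hKdef]
    rw [show (fun (st : Option Int × Int) (k : Int) =>
        (some (min (match st.1 with
            | none => PySem.List.pyGetD R k 0
            | some m => min m (PySem.List.pyGetD R k 0)) (PySem.List.pyGetD R (N - 1 - k) 0)),
          if PySem.List.pyGetD R k 0 - min (match st.1 with
              | none => PySem.List.pyGetD R k 0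
              | some m => min m (PySem.List.pyGetD R k 0)) (PySem.List.pyGetD R (N - 1 - k) 0) >
              st.2 then
            PySem.List.pyGetD R k 0 - min (match st.1 with
              | none => PySem.List.pyGetD R k 0
              | some m => min m (PySem.List.pyGetD R k 0)) (PySem.List.pyGetD R (N - 1 - k) 0)
          else st.2)) = stepB R N from rfl]
    rw [PySem.List.pyRange_neg_one_cons (by omega)]
    rw [List.foldl_cons, List.foldl_cons, stepB_none]
    have hbase : min (PySem.List.pyGetD R K 0) (PySem.List.pyGetD R (N - 1 - K) 0) =
        mnvI R N K := by
      simpa [gI] using mnv_base R N K hKb.1 hKb.2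
    rw [hbase]
    rw [show (if PySem.List.pyGetD R K 0 - mnvI R N K > (0 : Int) then
          PySem.List.pyGetD R K 0 - mnvI R N K else (0 : Int)) =
        max 0 (MI R N K) from by simp only [MI, gI]; omega]
    by_cases hK0 : K = 0
    · rw [hK0, show (0 : Int) - 1 = -1 from by ring,
        PySem.List.pyRange_neg_one_eq_nil (by norm_num)]
      simp
    · have hcast : ((K - 1).toNat : Int) = K - 1 := by omega
      have hinv := b_inv R N (K - 1).toNat (max 0 (MI R N K)) (mnvI R N K)
        (by rw [hcast]; omega)
        (by rw [hcast]; simpa [gI] using mnv_rec R N (K - 1) (by omega))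
      rw [hcast] at hinv
      rw [hinv]
  rw [hAside, hBside, PySem.List.pyRange_neg_one_eq_reverse, foldl_max_reverse,
    show (-1 : Int) + 1 = 0 from by ring]
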